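-- pv_equiv track=rewrite | github.com/medverve/Claims-CQC | quality_checks.py | _collect_supporting_documents
-- ===== SOURCE A (Python) =====
-- from typing import Dict, List, Any, Optional
--
-- def _collect_supporting_documents(documents: Dict[str, Any]) -> Dict[str, bool]:
--     """Combine supporting document availability flags across all documents."""
--     combined: Dict[str, bool] = {}
--     for doc in documents.values():
--         support = (doc or {}).get('supporting_documents') or {}
--         for key, value in support.items():
--             if isinstance(value, bool):
--                 combined[key] = combined.get(key, False) or value
--     return combined
-- ===== SOURCE B (Python) =====
-- from typing import Dict, Any
--
--
-- def _collect_supporting_documents(documents: Dict[str, Any]) -> Dict[str, bool]: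
--     """Flatten-then-aggregate: gather every (key, bool) flag into one flat list,
--     take the distinct keys in first-appearance order, and OR the flags per key."""
--     pairs = []
--     for doc in documents.values():
--         support = (doc or {}).get('supporting_documents') or {}
--         pairs.extend((k, v) for k, v in support.items() if isinstance(v, bool))
--     keys = list(dict.fromkeys(k for k, _ in pairs))
--     return {k: any(v for kk, v in pairs if kk == k) for k in keys}
-- ===== Notes on version B (the rewrite author's own statement) =====
-- stated objective: alternative
-- what changed: B drops A's running-OR dict entirely: it flattens all boolean flags into one list of (key, value) pairs, dedups the keys in first-appearance order, and builds the result by OR-ing the filtered flags per key.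
import Mathlib
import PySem

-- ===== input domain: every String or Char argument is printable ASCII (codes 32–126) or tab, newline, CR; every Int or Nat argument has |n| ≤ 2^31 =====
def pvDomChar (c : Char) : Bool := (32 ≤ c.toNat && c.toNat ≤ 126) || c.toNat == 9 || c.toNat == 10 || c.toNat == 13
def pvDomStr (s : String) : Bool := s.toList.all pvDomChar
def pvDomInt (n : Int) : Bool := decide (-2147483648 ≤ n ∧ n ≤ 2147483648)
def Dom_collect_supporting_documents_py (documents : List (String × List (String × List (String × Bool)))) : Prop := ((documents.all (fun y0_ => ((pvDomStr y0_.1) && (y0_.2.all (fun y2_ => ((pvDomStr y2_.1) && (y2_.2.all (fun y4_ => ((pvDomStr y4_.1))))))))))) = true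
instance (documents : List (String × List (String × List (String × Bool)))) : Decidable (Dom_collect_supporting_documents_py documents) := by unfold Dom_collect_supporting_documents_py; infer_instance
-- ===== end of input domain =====

-- B replaces A's running-OR dict with flatten-then-aggregate (flat pair list, dedup keys, OR per key by filtering); alternative decomposition, same observable result.


-- ===== PORT A =====
-- support = (doc or {}).get('supporting_documents') or {} : a missing key yields the empty
-- dict; under the typed domain the inner values are exactly Bool, so the
-- `isinstance(value, bool)` guard is always true and the body always runs.
def pySupport (doc : List (String × List (String × Bool))) : List (String × Bool) :=
  (PySem.Dict.mk doc).getD "supporting_documents" []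

def collect_supporting_documents_py (documents : List (String × List (String × List (String × Bool)))) : List (String × Bool) :=
  (documents.foldl (fun combined doc =>
      (pySupport doc.2).foldl
        (fun c kv => c.insert kv.1 (c.getD kv.1 false || kv.2)) combined)
    PySem.Dict.empty).items

-- ===== PORT B =====
-- pairs.extend(...) ; keys = list(dict.fromkeys(...)) ; {k: any(v for kk, v in pairs if kk == k) for k in keys}
def collect_supporting_documents_py_alt (documents : List (String × List (String × List (String × Bool)))) : List (String × Bool) :=
  let pairs : List (String × Bool) :=
    documents.foldl (fun acc doc =>
      acc ++ (PySem.Dict.mk doc.2).getD "supporting_documents" []) []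
  let keys : List String := PySem.List.dedup (pairs.map Prod.fst)
  keys.map (fun k => (k, (pairs.filter (fun p => p.1 == k)).any Prod.snd))

-- ===== PRECONDITION & SPEC =====
def Spec_collect_supporting_documents_py (documents : List (String × List (String × List (String × Bool)))) (out : List (String × Bool)) : Prop := out = collect_supporting_documents_py_alt documents
instance (documents : List (String × List (String × List (String × Bool)))) (out : List (String × Bool)) : Decidable (Spec_collect_supporting_documents_py documents out) := by unfold Spec_collect_supporting_documents_py; infer_instance

-- ===== CLAIM (what is proved, stated in full; the proofs are below) =====
def Claim_equal_collect_supporting_documents_py : Prop := ∀ (documents : List (String × List (String × List (String × Bool)))), Dom_collect_supporting_documents_py documents → Spec_collect_supporting_documents_py documents (collect_supporting_documents_py documents)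

-- ===== LEMMAS AND PROOFS =====

-- abbreviation used only by the proofs
def pvCollapse (L : List (String × Bool)) : List (String × Bool) :=
  (PySem.List.dedup (L.map Prod.fst)).map
    (fun k => (k, (L.filter (fun p => p.1 == k)).any Prod.snd))

-- B's accumulating `pairs` loop is the flat concatenation of the support dicts
theorem pvFlat_eq (documents : List (String × List (String × List (String × Bool)))) (acc : List (String × Bool)) :
    documents.foldl (fun acc doc =>
        acc ++ (PySem.Dict.mk doc.2).getD "supporting_documents" []) acc
      = acc ++ documents.flatMap (fun doc => pySupport doc.2) := by
  induction documents generalizing acc with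
  | nil => simp
  | cons d rest ih => simp [ih, pySupport, List.append_assoc]

-- A's nested fold is the single fold over the flattened pair list
theorem pvAfold_eq (documents : List (String × List (String × List (String × Bool)))) (d : PySem.Dict String Bool) :
    documents.foldl (fun combined doc =>
        (pySupport doc.2).foldl
          (fun c kv => c.insert kv.1 (c.getD kv.1 false || kv.2)) combined) d
      = (documents.flatMap (fun doc => pySupport doc.2)).foldl
          (fun c kv => c.insert kv.1 (c.getD kv.1 false || kv.2)) d := by
  induction documents generalizing d with
  | nil => simp
  | cons doc rest ih => simp [List.foldl_append, ih]

theorem pvDedup_append (xs : List String) (x : String) :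
    PySem.List.dedup (xs ++ [x])
      = if x ∈ xs then PySem.List.dedup xs else PySem.List.dedup xs ++ [x] := by
  simp only [PySem.List.dedup_eq_ofList, PySem.Set.ofList_eq_foldl, List.foldl_append,
    List.foldl_cons, List.foldl_nil]
  by_cases hx : x ∈ xs <;>
    simp [PySem.Set.add, PySem.Set.contains, hx, ← PySem.Set.ofList_eq_foldl,
      PySem.Set.mem_ofList]

-- the heart: the running-OR dict's items are exactly the collapse of the pair list
theorem pvItems_foldl_or (L : List (String × Bool)) :
    (L.foldl (fun c kv => c.insert kv.1 (c.getD kv.1 false || kv.2)) PySem.Dict.empty).items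
      = pvCollapse L := by
  induction L using List.reverseRecOn with
  | nil => simp [pvCollapse, PySem.List.dedup, PySem.Dict.empty]
  | append_singleton L kv ih =>
      rw [List.foldl_append, List.foldl_cons, List.foldl_nil]
      set d := L.foldl (fun c kv => c.insert kv.1 (c.getD kv.1 false || kv.2)) PySem.Dict.empty with hd
      have hnodup : d.keys.Nodup := by
        have := PySem.Dict.nodup_keys_foldl_insert_key L Prod.fst
          (fun c kv => c.getD kv.1 false || kv.2) PySem.Dict.empty (by simp)
        exact this
      have hkeys : d.keys = PySem.List.dedup (L.map Prod.fst) := by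
        have : d.keys = d.items.map Prod.fst := rfl
        rw [this, ih, pvCollapse, List.map_map]
        simp [Function.comp_def]
      by_cases hmem : kv.1 ∈ L.map Prod.fst
      · -- key already present: insert overwrites in place
        have hc : d.contains kv.1 = true := by
          rw [PySem.Dict.contains_eq_decide_mem_keys, hkeys]
          simp [hmem]
        have hget : d.getD kv.1 false = (L.filter (fun p => p.1 == kv.1)).any Prod.snd := by
          have hm : (kv.1, (L.filter (fun p => p.1 == kv.1)).any Prod.snd) ∈ d.items := by
            rw [ih, pvCollapse]
            exact List.mem_map_of_mem (by simp [hmem])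
          exact PySem.Dict.getD_of_mem_items _ hm hnodup false
        rw [PySem.Dict.items_insert_of_contains _ _ hc, ih, hget]
        unfold pvCollapse
        rw [List.map_append]
        simp only [List.map_cons, List.map_nil]
        rw [pvDedup_append, if_pos hmem, List.map_map]
        apply List.map_congr_left
        intro k hk
        by_cases hkk : (k == kv.1) = true
        · have hk1 : k = kv.1 := by simpa using hkk
          simp [Function.comp, hk1, List.filter_append, List.any_append]
        · have hk1 : ¬ (kv.1 == k) = true := by
            simp at hkk ⊢; exact fun h => hkk h.symm
          simp [Function.comp, hkk, List.filter_append, hk1]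
      · -- fresh key: insert appends, and no earlier pair has this key
        have hc : d.contains kv.1 = false := by
          rw [PySem.Dict.contains_eq_decide_mem_keys, hkeys]
          simp [hmem]
        have hget : d.getD kv.1 false = false := PySem.Dict.getD_of_not_contains _ _ hc
        have hfilt : L.filter (fun p => p.1 == kv.1) = [] := by
          rw [List.filter_eq_nil_iff]
          intro p hp
          simp only [beq_iff_eq]
          exact fun h => hmem (h ▸ List.mem_map_of_mem hp)
        rw [PySem.Dict.items_insert_of_not_contains _ _ hc, ih, hget]
        unfold pvCollapse
        rw [List.map_append]
        simp only [List.map_cons, List.map_nil]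
        rw [pvDedup_append, if_neg hmem, List.map_append]
        congr 1
        · apply List.map_congr_left
          intro k hk
          have hkmem : k ∈ L.map Prod.fst := by
            simpa [PySem.List.mem_dedup] using hk
          have hk1 : ¬ (kv.1 == k) = true := by
            simp only [beq_iff_eq]
            exact fun h => hmem (h ▸ hkmem)
          simp [List.filter_append, hk1]
        · simp only [List.map_cons, List.map_nil, List.filter_append, hfilt, List.nil_append]
          simp

-- ===== VERDICT (by name: the statement is the Claim_ definition above) =====
theorem collect_supporting_documents_py_spec : Claim_equal_collect_supporting_documents_py := by
  intro documents _
  unfold Spec_collect_supporting_documents_py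
  unfold collect_supporting_documents_py collect_supporting_documents_py_alt
  rw [pvAfold_eq, pvItems_foldl_or, pvFlat_eq, List.nil_append]
  rfl
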